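-- pv_equiv track=rewrite | github.com/zhaocheng1996/pyproject | algorithm_test/list/getSubset.py | getAllSubset
-- ===== SOURCE A (Python) =====
-- def getAllSubset(str):
--     arr = []
--     arr.append(str[0:1])
--     i = 1
--     while i<len(str):
--         lens = len(arr)
--         j = 0
--         while j<lens:
--             arr.append(arr[j]+str[i])#每个元素都加上当前迭代的元素
--             j+=1
--         arr.append(str[i:i+1])#加当前迭代的元素
--         i+=1
--     return arr
-- ===== SOURCE B (Python) =====
-- def getAllSubset(str):
--     # Recursive decomposition over the prefix: subsets of s = subsets of s[:-1],
--     # each of those extended by the last char, then the last char alone.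
--     if len(str) <= 1:
--         return [str[0:1]]
--     prev = getAllSubset(str[:-1])
--     last = str[-1]
--     return prev + [e + last for e in prev] + [last]
-- ===== Notes on version B (the rewrite author's own statement) =====
-- stated objective: simpler
-- what changed: Replaced A's iterative double while-loop with index bookkeeping by a direct recursion on the string prefix: subsets of s are subsets of s[:-1], each of those extended by the last character, then the last character alone.
import Mathlib
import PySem

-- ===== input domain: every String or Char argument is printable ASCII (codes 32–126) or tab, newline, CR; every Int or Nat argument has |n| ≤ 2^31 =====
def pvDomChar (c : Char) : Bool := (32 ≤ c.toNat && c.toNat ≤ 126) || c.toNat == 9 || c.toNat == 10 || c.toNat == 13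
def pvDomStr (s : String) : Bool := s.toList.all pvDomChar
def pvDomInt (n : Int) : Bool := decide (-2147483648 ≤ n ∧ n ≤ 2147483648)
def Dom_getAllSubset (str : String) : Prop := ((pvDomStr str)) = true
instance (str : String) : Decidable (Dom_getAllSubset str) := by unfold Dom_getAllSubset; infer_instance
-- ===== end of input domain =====

-- B replaces A's iterative double while-loop with a recursion on the string prefix
-- (subsets of s = subsets of s[:-1], each extended by the last char, then the last char alone).

-- ===== PORT A =====
-- inner while loop: j from 0 while j < lens, appending arr[j] + str[i]
def pvInnerA (c : Char) (lens : Nat) (arr : List String) (j : Nat) : List String :=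
  if _h : j < lens then
    pvInnerA c lens (arr ++ [arr.getD j "" ++ c.toString]) (j + 1)
  else arr
termination_by lens - j

-- outer while loop: i from 1 while i < len(str); str[i:i+1] is the one-char slice
def pvOuterA (cs : List Char) (arr : List String) (i : Nat) : List String :=
  if _h : i < cs.length then
    let c := cs.getD i ' '  -- str[i], in range since i < len(str)
    pvOuterA cs
      (pvInnerA c arr.length arr 0
        ++ [String.ofList (PySem.List.slice cs (some (i : Int)) (some ((i : Int) + 1)))])
      (i + 1)
  else arr
termination_by cs.length - i

def getAllSubset (str : String) : List String :=
  pvOuterA str.toList [String.ofList (PySem.List.slice str.toList (some 0) (some 1))] 1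

-- ===== PORT B =====
-- str[:-1] is dropLast (PySem.List.slice_to_neg_one); str[-1] is getLast
def pvAltGo (cs : List Char) : List String :=
  if _h : cs.length ≤ 1 then [String.ofList (cs.take 1)]
  else
    let prev := pvAltGo cs.dropLast
    let last := cs.getLastD ' '  -- str[-1], nonempty since length > 1
    prev ++ prev.map (fun e => e ++ last.toString) ++ [last.toString]
termination_by cs.length
decreasing_by simp [List.length_dropLast]; omega

def getAllSubset_alt (str : String) : List String := pvAltGo str.toList

-- ===== PRECONDITION & SPEC =====
def Spec_getAllSubset (str : String) (out : List String) : Prop := out = getAllSubset_alt str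
instance (str : String) (out : List String) : Decidable (Spec_getAllSubset str out) := by unfold Spec_getAllSubset; infer_instance

-- ===== CLAIM (what is proved, stated in full; the proofs are below) =====
def Claim_equal_getAllSubset : Prop := ∀ (str : String), Dom_getAllSubset str → Spec_getAllSubset str (getAllSubset str)

-- ===== LEMMAS AND PROOFS =====

-- the common round step: arr ← arr ++ [e+c for e in arr] ++ [c]
def pvStep (arr : List String) (c : Char) : List String :=
  arr ++ arr.map (fun e => e ++ c.toString) ++ [c.toString]

lemma pvInnerA_spec (c : Char) :
    ∀ (k : Nat) (base extra : List String) (j : Nat), j + k = base.length →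
      pvInnerA c base.length (base ++ extra) j
        = base ++ extra ++ (base.drop j).map (fun e => e ++ c.toString) := by
  intro k
  induction k with
  | zero =>
    intro base extra j hj
    have hj' : j = base.length := by omega
    subst hj'
    rw [pvInnerA]
    simp
  | succ k ih =>
    intro base extra j hj
    have hj' : j < base.length := by omega
    rw [pvInnerA, dif_pos hj']
    have hget : (base ++ extra).getD j "" = base[j] := by
      simp [List.getD, List.getElem?_append_left hj', List.getElem?_eq_getElem hj']
    rw [hget, List.append_assoc]
    rw [ih base (extra ++ [base[j] ++ c.toString]) (j + 1) (by omega)]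
    simp only [List.append_assoc, List.singleton_append, List.map_drop]
    conv_rhs => rw [List.drop_eq_getElem_cons (by simpa using hj')]
    simp

lemma pvOuterA_spec (cs : List Char) :
    ∀ (k : Nat) (arr : List String) (i : Nat), cs.length - i ≤ k →
      pvOuterA cs arr i = (cs.drop i).foldl pvStep arr := by
  intro k
  induction k with
  | zero =>
    intro arr i hk
    rw [pvOuterA, dif_neg (by omega)]
    rw [List.drop_of_length_le (by omega)]
    rfl
  | succ k ih =>
    intro arr i hk
    rw [pvOuterA]
    by_cases h : i < cs.length
    · rw [dif_pos h]
      have hc : cs.getD i ' ' = cs[i] := by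
        simp [List.getD, List.getElem?_eq_getElem h]
      have hinner : pvInnerA (cs.getD i ' ') arr.length arr 0
          = arr ++ arr.map (fun e => e ++ (cs.getD i ' ').toString) := by
        have := pvInnerA_spec (cs.getD i ' ') arr.length arr [] 0 (by omega)
        simpa using this
      have hslice : PySem.List.slice cs (some (i : Int)) (some ((i : Int) + 1))
          = [cs[i]] := by
        have h1 := PySem.List.slice_natCast_add cs i 1
        have h2 : (cs.drop i).take 1 = [cs[i]] := by
          rw [List.drop_eq_getElem_cons h]; rfl
        simpa [h2] using h1
      rw [ih _ (i + 1) (by omega), hinner, hslice, hc]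
      rw [List.drop_eq_getElem_cons h, List.foldl_cons]
      rfl
    · rw [dif_neg h]
      rw [List.drop_of_length_le (by omega)]
      rfl

lemma pvAltGo_spec (cs : List Char) :
    pvAltGo cs = (cs.drop 1).foldl pvStep [String.ofList (cs.take 1)] := by
  induction cs using List.reverseRecOn with
  | nil => rw [pvAltGo]; simp
  | append_singleton ds c ih =>
    cases hds : ds with
    | nil => rw [pvAltGo]; simp
    | cons d ds' =>
      subst hds
      have hlen : ¬ (d :: ds' ++ [c]).length ≤ 1 := by simp
      rw [pvAltGo, dif_neg hlen]
      have h1 : (d :: ds' ++ [c]).dropLast = d :: ds' := List.dropLast_concat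
      have h2 : (d :: ds' ++ [c]).getLastD ' ' = c := by
        rw [show d :: ds' ++ [c] = (d :: ds') ++ [c] from rfl]
        rw [List.getLastD_eq_getLast?, List.getLast?_append]
        simp
      have h3 : (d :: ds' ++ [c]).drop 1 = (d :: ds').drop 1 ++ [c] := by simp
      have h4 : (d :: ds' ++ [c]).take 1 = (d :: ds').take 1 := by simp
      rw [h1, h2, h3, h4, List.foldl_append, ← ih]
      rfl

-- ===== VERDICT (by name: the statement is the Claim_ definition above) =====
theorem getAllSubset_spec : Claim_equal_getAllSubset := by
  intro str _
  unfold Spec_getAllSubset getAllSubset getAllSubset_alt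
  rw [pvOuterA_spec str.toList str.toList.length _ 1 (by omega)]
  rw [pvAltGo_spec]
  have : PySem.List.slice str.toList (some 0) (some 1) = str.toList.take 1 := by
    simpa using PySem.List.slice_to str.toList (b := 1) (by omega)
  rw [this]
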